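-- pv_equiv track=rewrite | github.com/hpedrobs/pronfes | nfe/tools.py | formatarDocumento
-- ===== SOURCE A (Python) =====
-- def clearPermittedText(text, allowed):
--     _result = ""
--     for ch in text:
--         if ch in allowed:
--             _result += ch
--     return _result
--
-- def apenasNumeros(text):
--     return onlyNumbers(text)
--
-- def onlyNumbers(text):
--     _valid = "1234567890"
--     return clearPermittedText(text, _valid)
--
-- def formatarMask(text, mask):
--     _i = 0
--     _result = ""
--     for _m in range(len(mask)):
--         if mask[_m] == "9":
--             if len(text) >= _i + 1:
--                 _result += text[_i]
--                 _i += 1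
--             else:
--                 break
--         elif len(text) >= _i + 1:
--             _result += mask[_m]
--     return _result
--
-- def formatarCPF(text):
--     return formatarMask(text, "999.999.999-99")
--
-- def formatarCNPJ(text):
--     return formatarMask(text, "99.999.999/9999-99")
--
-- def formatarDocumento(text):
--     _result = ""
--     if text == None:
--         return ""
--     _t = apenasNumeros(text)
--     if _t == "":
--         _result = ""
--     if len(_t) <= 11:
--         while len(_t) < 11:
--             _t = "0" + _t
--         _result = formatarCPF(_t)
--     else:
--         while len(_t) < 14:
--             _t = "0" + _t
--         _result = formatarCNPJ(_t)
--     return _result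
-- ===== SOURCE B (Python) =====
-- def formatarDocumento(text):
--     if text is None:
--         return ""
--     d = "".join(c for c in text if c in "0123456789")
--     if len(d) <= 11:
--         d = d.zfill(11)
--         return f"{d[:3]}.{d[3:6]}.{d[6:9]}-{d[9:11]}"
--     d = d.zfill(14)
--     return f"{d[:2]}.{d[2:5]}.{d[5:8]}/{d[8:12]}-{d[12:14]}"
-- ===== Notes on version B (the rewrite author's own statement) =====
-- stated objective: simpler
-- what changed: Replaces A's character-by-character mask-interpreter loop and the zero-prepending while-loop with str.zfill plus direct positional slicing into an f-string.
import Mathlib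
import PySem

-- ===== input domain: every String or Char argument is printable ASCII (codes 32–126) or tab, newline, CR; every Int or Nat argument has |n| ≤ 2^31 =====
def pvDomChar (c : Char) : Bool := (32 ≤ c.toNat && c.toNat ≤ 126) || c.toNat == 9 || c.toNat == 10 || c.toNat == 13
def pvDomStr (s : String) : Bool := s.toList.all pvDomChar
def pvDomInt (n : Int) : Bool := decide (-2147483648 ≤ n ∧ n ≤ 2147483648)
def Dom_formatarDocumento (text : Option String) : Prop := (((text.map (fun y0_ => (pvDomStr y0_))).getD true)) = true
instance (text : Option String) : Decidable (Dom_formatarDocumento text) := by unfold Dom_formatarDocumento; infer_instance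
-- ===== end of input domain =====

-- B replaces A's char-by-char mask interpreter and zero-prepending while-loop with zfill plus positional slicing (objective: simpler).

-- ===== PORT A =====
def pvClearPermittedText (text allowed : List Char) : List Char :=
  text.foldl (fun res ch => if allowed.contains ch then res ++ [ch] else res) []

def pvOnlyNumbers (text : List Char) : List Char :=
  pvClearPermittedText text ['1','2','3','4','5','6','7','8','9','0']

def pvApenasNumeros (text : List Char) : List Char := pvOnlyNumbers text

-- the loop of formatarMask: walks the mask, consuming text[i] on '9'; `break` = stop appending
def pvMaskGo (text : List Char) (mask : List Char) (i : Nat) : List Char :=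
  match mask with
  | [] => []
  | m :: ms =>
    if m = '9' then
      if i + 1 ≤ text.length then text.getD i ' ' :: pvMaskGo text ms (i + 1) else []
    else
      if i + 1 ≤ text.length then m :: pvMaskGo text ms i
      else pvMaskGo text ms i

def pvFormatarMask (text mask : List Char) : List Char := pvMaskGo text mask 0

def pvFormatarCPF (text : List Char) : List Char :=
  pvFormatarMask text ['9','9','9','.','9','9','9','.','9','9','9','-','9','9']

def pvFormatarCNPJ (text : List Char) : List Char :=
  pvFormatarMask text ['9','9','.','9','9','9','.','9','9','9','/','9','9','9','9','-','9','9']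

-- the `while len(_t) < n: _t = "0" + _t` loop
def pvPadLoop (n : Nat) (t : List Char) : List Char :=
  if t.length < n then pvPadLoop n ('0' :: t) else t
termination_by n - t.length

-- the `if _t == "": _result = ""` line of A is dead (`_result` is overwritten below it), so it has no port
def formatarDocumento (text : Option String) : String :=
  match text with
  | none => ""
  | some s =>
    let t := pvApenasNumeros s.toList
    if t.length ≤ 11 then String.ofList (pvFormatarCPF (pvPadLoop 11 t))
    else String.ofList (pvFormatarCNPJ (pvPadLoop 14 t))

-- ===== PORT B =====
def formatarDocumento_alt (text : Option String) : String :=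
  match text with
  | none => ""
  | some s =>
    let d := s.toList.filter (fun c => ['0','1','2','3','4','5','6','7','8','9'].contains c)
    if d.length ≤ 11 then
      let z := PySem.Chars.zfill d 11
      String.ofList (PySem.List.slice z none (some 3) ++ '.' ::
                     PySem.List.slice z (some 3) (some 6) ++ '.' ::
                     PySem.List.slice z (some 6) (some 9) ++ '-' ::
                     PySem.List.slice z (some 9) (some 11))
    else
      let z := PySem.Chars.zfill d 14
      String.ofList (PySem.List.slice z none (some 2) ++ '.' ::
                     PySem.List.slice z (some 2) (some 5) ++ '.' ::
                     PySem.List.slice z (some 5) (some 8) ++ '/' ::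
                     PySem.List.slice z (some 8) (some 12) ++ '-' ::
                     PySem.List.slice z (some 12) (some 14))

-- ===== PRECONDITION & SPEC =====
def Spec_formatarDocumento (text : Option String) (out : String) : Prop := out = formatarDocumento_alt text
instance (text : Option String) (out : String) : Decidable (Spec_formatarDocumento text out) := by unfold Spec_formatarDocumento; infer_instance

-- ===== CLAIM (what is proved, stated in full; the proofs are below) =====
def Claim_equal_formatarDocumento : Prop := ∀ (text : Option String), Dom_formatarDocumento text → Spec_formatarDocumento text (formatarDocumento text)

-- ===== LEMMAS AND PROOFS =====

theorem pvDigits_eq (s : List Char) :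
    pvApenasNumeros s = s.filter (fun c => ['0','1','2','3','4','5','6','7','8','9'].contains c) := by
  unfold pvApenasNumeros pvOnlyNumbers pvClearPermittedText
  rw [PySem.List.foldl_append_if]
  simp only [List.nil_append, List.map_id']
  apply List.filter_congr
  intro c _
  simp only [List.contains_eq_mem, decide_eq_decide]
  constructor <;> (intro h; fin_cases h <;> decide)

theorem pvPadLoop_eq (n : Nat) (t : List Char) :
    pvPadLoop n t = List.replicate (n - t.length) '0' ++ t := by
  by_cases h : t.length < n
  · rw [pvPadLoop, if_pos h, pvPadLoop_eq n ('0' :: t)]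
    have h1 : n - t.length = (n - ('0' :: t).length) + 1 := by simp; omega
    rw [h1, List.replicate_succ']
    simp
  · rw [pvPadLoop, if_neg h]
    have : n - t.length = 0 := by omega
    simp [this]
termination_by n - t.length

theorem pvZfill_eq (t : List Char) (w : Int) (hw : 0 ≤ w)
    (hd : ∀ c ∈ t, c ≠ '+' ∧ c ≠ '-') :
    PySem.Chars.zfill t w = List.replicate (w.toNat - t.length) '0' ++ t := by
  cases t with
  | nil =>
    simp only [PySem.Chars.zfill, List.length_nil, List.append_nil, Nat.sub_zero]
    split_ifs with h
    · have : w.toNat = 0 := by omega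
      simp [this]
    · rfl
  | cons c rest =>
    obtain ⟨h1, h2⟩ := hd c (by simp)
    by_cases h : w ≤ (c :: rest).length
    · simp only [PySem.Chars.zfill, if_pos h]
      have h0 : w.toNat - (rest.length + 1) = 0 := by
        simp at h; omega
      simp [h0]
    · simp only [PySem.Chars.zfill, if_neg h]
      simp [h1, h2]

theorem pvCpfMask (l : List Char) (h : l.length = 11) :
    pvFormatarCPF l =
      l.take 3 ++ '.' :: (l.drop 3).take 3 ++ '.' :: (l.drop 6).take 3 ++ '-' :: (l.drop 9).take 2 := by
  match l, h with
  | [a,b,c,d,e,f,g,h,i,j,k], _ => rfl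

theorem pvCnpjMask (l : List Char) (h : 14 ≤ l.length) :
    pvFormatarCNPJ l =
      l.take 2 ++ '.' :: (l.drop 2).take 3 ++ '.' :: (l.drop 5).take 3 ++ '/' :: (l.drop 8).take 4 ++ '-' :: (l.drop 12).take 2 := by
  match l with
  | a::b::c::d::e::f::g::h'::i::j::k::m::n::o::rest =>
    simp [pvFormatarCNPJ, pvFormatarMask, pvMaskGo, List.getD]

theorem formatarDocumento_eq (text : Option String) :
    formatarDocumento text = formatarDocumento_alt text := by
  match text with
  | none => rfl
  | some s =>
    unfold formatarDocumento formatarDocumento_alt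
    simp only [pvDigits_eq]
    set d := s.toList.filter (fun c => ['0','1','2','3','4','5','6','7','8','9'].contains c) with hd
    have hdig : ∀ c ∈ d, c ≠ '+' ∧ c ≠ '-' := by
      intro c hc
      rw [hd] at hc
      have hm := List.of_mem_filter hc
      simp only [List.contains_eq_mem, decide_eq_true_eq] at hm
      fin_cases hm <;> decide
    by_cases hlen : d.length ≤ 11
    · rw [if_pos hlen, if_pos hlen]
      have hz : PySem.Chars.zfill d (11 : Int) = pvPadLoop 11 d := by
        rw [pvZfill_eq d 11 (by norm_num) hdig, pvPadLoop_eq]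
        rfl
      rw [← hz] at *
      have h11 : (PySem.Chars.zfill d (11 : Int)).length = 11 := by
        rw [pvZfill_eq d 11 (by norm_num) hdig]
        simp; omega
      rw [pvCpfMask _ h11]
      congr 1
      simp [PySem.List.slice, h11]
    · rw [if_neg hlen, if_neg hlen]
      have hz : PySem.Chars.zfill d (14 : Int) = pvPadLoop 14 d := by
        rw [pvZfill_eq d 14 (by norm_num) hdig, pvPadLoop_eq]
        rfl
      rw [← hz]
      have h14 : 14 ≤ (PySem.Chars.zfill d (14 : Int)).length := by
        rw [pvZfill_eq d 14 (by norm_num) hdig]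
        simp; omega
      rw [pvCnpjMask _ h14]
      congr 1
      simp [PySem.List.slice]
      rw [show min 2 (PySem.Chars.zfill d 14).length = 2 from by omega,
          show min 5 (PySem.Chars.zfill d 14).length = 5 from by omega,
          show min 8 (PySem.Chars.zfill d 14).length = 8 from by omega,
          show min 12 (PySem.Chars.zfill d 14).length = 12 from by omega,
          show min 14 (PySem.Chars.zfill d 14).length = 14 from by omega]

-- ===== VERDICT (by name: the statement is the Claim_ definition above) =====
theorem formatarDocumento_spec : Claim_equal_formatarDocumento := by
  intro text _
  unfold Spec_formatarDocumento
  exact formatarDocumento_eq text
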